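-- pv_equiv track=rewrite | github.com/Corentin-Lcs/nsi-practical-exams | 2021/Corrigés.py | positif
-- ===== SOURCE A (Python) =====
-- def positif(T :  list) -> list:
--     T2 = list(T)
--     T3 = []
--     while T2 != []:
--         x = T2.pop()
--         if x >= 0:
--             T3.append(x)
--     T2 = []
--     while T3 != []:
--         T2.append(T3.pop())
--     return T2
-- ===== SOURCE B (Python) =====
-- def positif(T: list) -> list:
--     res = []
--     for x in T:
--         if x >= 0:
--             res.append(x)
--     return res
-- ===== Notes on version B (the rewrite author's own statement) =====
-- stated objective: simpler
-- what changed: Replaces A's two destructive pop-based passes (reverse-filter into a stack, then pop it back to restore order) with one forward traversal appending non-negative elements directly.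
import Mathlib
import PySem

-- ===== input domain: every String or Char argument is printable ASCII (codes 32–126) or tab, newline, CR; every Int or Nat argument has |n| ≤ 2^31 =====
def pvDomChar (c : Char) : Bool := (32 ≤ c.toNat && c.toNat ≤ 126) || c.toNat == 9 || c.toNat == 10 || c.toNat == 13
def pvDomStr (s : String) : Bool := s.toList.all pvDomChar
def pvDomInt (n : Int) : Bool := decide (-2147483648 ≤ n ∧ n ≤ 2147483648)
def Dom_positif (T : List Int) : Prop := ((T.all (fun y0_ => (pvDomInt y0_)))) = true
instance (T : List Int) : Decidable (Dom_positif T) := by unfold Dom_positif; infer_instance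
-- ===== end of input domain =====

-- B replaces A's two destructive pop-based passes (reverse-filter, then re-reverse) with one
-- forward loop appending non-negative elements; objective: simpler.

-- ===== PORT A =====
-- first while loop: pop from the end of T2, push kept elements onto T3
def positifLoop1 (T2 T3 : List Int) : List Int :=
  if h : T2 = [] then T3
  else
    let x := T2.getLast h
    positifLoop1 T2.dropLast (if x ≥ 0 then T3 ++ [x] else T3)
termination_by T2.length
decreasing_by
  simp [List.length_dropLast]
  cases T2 with
  | nil => exact absurd rfl h
  | cons a t => simp

-- second while loop: pop from the end of T3, append onto T2
def positifLoop2 (T3 T2 : List Int) : List Int :=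
  if h : T3 = [] then T2
  else positifLoop2 T3.dropLast (T2 ++ [T3.getLast h])
termination_by T3.length
decreasing_by
  simp [List.length_dropLast]
  cases T3 with
  | nil => exact absurd rfl h
  | cons a t => simp

def positif (T : List Int) : List Int :=
  let T2 := T
  let T3 := positifLoop1 T2 []
  positifLoop2 T3 []

-- ===== PORT B =====
-- one forward pass with an accumulator (the for-loop of Source B)
def positif_alt (T : List Int) : List Int :=
  T.foldl (fun res x => if x ≥ 0 then res ++ [x] else res) []

-- ===== PRECONDITION & SPEC =====
def Spec_positif (T : List Int) (out : List Int) : Prop := out = positif_alt T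
instance (T : List Int) (out : List Int) : Decidable (Spec_positif T out) := by unfold Spec_positif; infer_instance

-- ===== CLAIM (what is proved, stated in full; the proofs are below) =====
def Claim_equal_positif : Prop := ∀ (T : List Int), Dom_positif T → Spec_positif T (positif T)

-- ===== LEMMAS AND PROOFS =====

theorem positifLoop1_eq (T2 T3 : List Int) :
    positifLoop1 T2 T3 = T3 ++ T2.reverse.filter (fun x => decide (x ≥ 0)) := by
  induction T2 using List.reverseRecOn generalizing T3 with
  | nil => simp [positifLoop1]
  | append_singleton xs x ih =>
      rw [positifLoop1]
      simp only [List.getLast_concat, List.dropLast_concat, List.reverse_append,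
        List.reverse_cons, List.reverse_nil, List.nil_append, List.cons_append,
        List.filter_cons]
      have hne : xs ++ [x] ≠ [] := by simp
      rw [dif_neg hne]
      by_cases hx : x ≥ 0
      · simp [hx, ih]
      · simp [hx, ih]

theorem positifLoop2_eq (T3 T2 : List Int) :
    positifLoop2 T3 T2 = T2 ++ T3.reverse := by
  induction T3 using List.reverseRecOn generalizing T2 with
  | nil => simp [positifLoop2]
  | append_singleton xs x ih =>
      rw [positifLoop2]
      have hne : xs ++ [x] ≠ [] := by simp
      rw [dif_neg hne]
      simp [ih]

theorem positif_alt_eq (T : List Int) (acc : List Int) :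
    T.foldl (fun res x => if x ≥ 0 then res ++ [x] else res) acc
      = acc ++ T.filter (fun x => decide (x ≥ 0)) := by
  induction T generalizing acc with
  | nil => simp
  | cons a t ih =>
      simp only [List.foldl_cons, List.filter_cons]
      by_cases ha : a ≥ 0
      · simp [ha, ih]
      · simp [ha, ih]

-- ===== VERDICT (by name: the statement is the Claim_ definition above) =====
theorem positif_spec : Claim_equal_positif := by
  intro T _
  simp only [Spec_positif, positif, positif_alt]
  rw [positifLoop1_eq, positifLoop2_eq, positif_alt_eq]
  simp
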